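-- pv_equiv track=rewrite | github.com/kleer001/Salad_Loom | src/core/interleave_node.py | _interleave_lists
-- ===== SOURCE A (Python) =====
-- from itertools import cycle
-- from typing import Dict, List, Tuple
--
-- def _interleave_lists(list_a: List[str], list_b: List[str], take_a: int, take_b: int) -> List[str]:
--     if not list_a and not list_b:
--         return []
--     if not list_a:
--         return list(list_b)
--     if not list_b:
--         return list(list_a)
--
--     result = []
--     longer_len = max(len(list_a), len(list_b))
--     cy_a = cycle(list_a)
--     cy_b = cycle(list_b)
--     total_needed = longer_len * (take_a + take_b)
--     produced = 0
--     while produced < total_needed: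
--         for _ in range(take_a):
--             result.append(next(cy_a))
--             produced += 1
--         for _ in range(take_b):
--             result.append(next(cy_b))
--             produced += 1
--     return result[:max(len(list_a), len(list_b)) * (take_a + take_b) // max(take_a, take_b)]
-- ===== SOURCE B (Python) =====
-- def _interleave_lists(list_a, list_b, take_a, take_b):
--     if not list_a and not list_b:
--         return []
--     if not list_a:
--         return list(list_b)
--     if not list_b:
--         return list(list_a)
--     period = take_a + take_b
--     longer = max(len(list_a), len(list_b))
--     final_len = longer * period // max(take_a, take_b)
--     out = []
--     for i in range(final_len):
--         rnd, r = divmod(i, period)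
--         if r < take_a:
--             out.append(list_a[(rnd * take_a + r) % len(list_a)])
--         else:
--             out.append(list_b[(rnd * take_b + (r - take_a)) % len(list_b)])
--     return out
-- ===== Notes on version B (the rewrite author's own statement) =====
-- stated objective: faster
-- what changed: B computes the final length up front and generates exactly that many items by direct modular indexing into the two lists (round/offset arithmetic), instead of A's cycle-iterators overproducing longer_len*(take_a+take_b) items into a list and slicing it down; B produces a factor max(take_a,take_b) fewer items.
-- outside the precondition, e.g. on _interleave_lists(['x', 'y'], ['u', 'v'], -1, 3): A returns ['u'], B returns ['v']; on _interleave_lists(['x'], ['y'], 0, 0): A raises ZeroDivisionError, B raises ZeroDivisionError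
import Mathlib
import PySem

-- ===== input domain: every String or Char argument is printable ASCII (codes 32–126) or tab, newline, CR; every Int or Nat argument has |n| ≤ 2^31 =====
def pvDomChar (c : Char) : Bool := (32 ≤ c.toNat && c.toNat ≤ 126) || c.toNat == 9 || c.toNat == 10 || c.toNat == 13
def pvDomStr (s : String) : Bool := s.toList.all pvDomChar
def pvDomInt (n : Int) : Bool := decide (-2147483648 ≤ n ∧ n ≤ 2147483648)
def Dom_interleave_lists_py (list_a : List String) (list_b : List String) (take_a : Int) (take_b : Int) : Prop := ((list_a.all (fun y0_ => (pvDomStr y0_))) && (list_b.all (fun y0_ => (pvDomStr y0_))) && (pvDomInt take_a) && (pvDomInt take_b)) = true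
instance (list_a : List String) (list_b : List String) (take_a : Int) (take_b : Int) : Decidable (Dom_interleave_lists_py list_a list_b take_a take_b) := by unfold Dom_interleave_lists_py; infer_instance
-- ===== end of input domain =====

-- B replaces A's overproduce-into-a-list-then-slice cycle loop by direct modular
-- indexing generating exactly final_len items (objective: faster, fewer items produced).

-- ===== PORT A =====
-- 'for _ in range(k): result.append(next(cy))' starting with the cycle at position
-- start: the k appended elements, each next(cy) being l[pos % len(l)].
def pvTakeCyc (l : List String) (start k : Nat) : List String :=
  (List.range k).map (fun j => l.getD ((start + j) % l.length) "")

-- the 'while produced < total_needed' loop; ia/ib are the positions of the two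
-- cycle iterators.  The inner 'if … = 0 then result' is only a termination guard:
-- Python would loop forever there, but that state is unreachable (when both lists
-- are nonempty and take_a+take_b ≤ 0 we have total_needed ≤ 0 = produced).
def pvALoop (a b : List String) (ta tb : Int) (ia ib : Nat) (produced total : Int)
    (result : List String) : List String :=
  if produced < total then
    if ta.toNat + tb.toNat = 0 then result
    else pvALoop a b ta tb (ia + ta.toNat) (ib + tb.toNat)
      (produced + ta.toNat + tb.toNat) total
      (result ++ pvTakeCyc a ia ta.toNat ++ pvTakeCyc b ib tb.toNat)
  else result
termination_by (total - produced).toNat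
decreasing_by omega

def interleave_lists_py (list_a : List String) (list_b : List String) (take_a : Int) (take_b : Int) : List String :=
  if list_a = [] ∧ list_b = [] then []
  else if list_a = [] then list_b
  else if list_b = [] then list_a
  else
    let longer_len : Int := (max list_a.length list_b.length : Nat)
    let total_needed : Int := longer_len * (take_a + take_b)
    let result := pvALoop list_a list_b take_a take_b 0 0 0 total_needed []
    PySem.List.slice result none
      (some (PySem.Int.floordiv (longer_len * (take_a + take_b)) (max take_a take_b)))

-- ===== PORT B =====
def interleave_lists_py_alt (list_a : List String) (list_b : List String) (take_a : Int) (take_b : Int) : List String :=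
  if list_a = [] ∧ list_b = [] then []
  else if list_a = [] then list_b
  else if list_b = [] then list_a
  else
    let period : Int := take_a + take_b
    let longer : Int := (max list_a.length list_b.length : Nat)
    let final_len : Int := PySem.Int.floordiv (longer * period) (max take_a take_b)
    (List.range final_len.toNat).map (fun (i : Nat) =>
      let rnd := PySem.Int.floordiv (i : Int) period
      let r := PySem.Int.mod (i : Int) period
      if r < take_a then
        list_a.getD (PySem.Int.mod (rnd * take_a + r) (list_a.length : Int)).toNat ""
      else
        list_b.getD (PySem.Int.mod (rnd * take_b + (r - take_a)) (list_b.length : Int)).toNat "")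

-- ===== PRECONDITION & SPEC =====
-- Pre_ excludes, when both lists are nonempty: mixed-sign take counts with positive sum
-- (negative counts are outside the natural domain; A's overproduce-then-slice arithmetic
-- there is an accident of its implementation) and take_a = take_b = 0 (A raises
-- ZeroDivisionError; so does B).  Takes with nonpositive sum but positive max are kept
-- (both programs return [] there and this is proved).
def Pre_interleave_lists_py (list_a : List String) (list_b : List String) (take_a : Int) (take_b : Int) : Prop :=
  (list_a = [] ∨ list_b = []) ∨ (0 ≤ take_a ∧ 0 ≤ take_b ∧ 0 < take_a + take_b)
    ∨ (take_a + take_b ≤ 0 ∧ 0 < max take_a take_b)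
instance (list_a : List String) (list_b : List String) (take_a : Int) (take_b : Int) : Decidable (Pre_interleave_lists_py list_a list_b take_a take_b) := by unfold Pre_interleave_lists_py; infer_instance

def pvWitness_interleave_lists_py : List String × List String × Int × Int :=
  (["a"], ["x", "y"], 2, 1)

def Spec_interleave_lists_py (list_a : List String) (list_b : List String) (take_a : Int) (take_b : Int) (out : List String) : Prop := out = interleave_lists_py_alt list_a list_b take_a take_b
instance (list_a : List String) (list_b : List String) (take_a : Int) (take_b : Int) (out : List String) : Decidable (Spec_interleave_lists_py list_a list_b take_a take_b out) := by unfold Spec_interleave_lists_py; infer_instance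

-- ===== CLAIM (what is proved, stated in full; the proofs are below) =====
def Claim_equal_interleave_lists_py : Prop := ∀ (list_a : List String) (list_b : List String) (take_a : Int) (take_b : Int), Dom_interleave_lists_py list_a list_b take_a take_b → Pre_interleave_lists_py list_a list_b take_a take_b → Spec_interleave_lists_py list_a list_b take_a take_b (interleave_lists_py list_a list_b take_a take_b)

-- ===== LEMMAS AND PROOFS =====

-- the list A's while loop appends over n rounds, cycles starting at ia/ib
def pvGen (a b : List String) (tA tB : Nat) : Nat → Nat → Nat → List String
  | _, _, 0 => []
  | ia, ib, n+1 =>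
      pvTakeCyc a ia tA ++ (pvTakeCyc b ib tB ++ pvGen a b tA tB (ia+tA) (ib+tB) n)

theorem pvTakeCyc_length (l : List String) (start k : Nat) :
    (pvTakeCyc l start k).length = k := by
  simp [pvTakeCyc]

theorem pvTakeCyc_getD (l : List String) (start k i : Nat) (h : i < k) :
    (pvTakeCyc l start k).getD i "" = l.getD ((start + i) % l.length) "" := by
  simp [pvTakeCyc, List.getD, h]

theorem pvGen_length (a b : List String) (tA tB : Nat) :
    ∀ (n ia ib : Nat), (pvGen a b tA tB ia ib n).length = n * (tA + tB) := by
  intro n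
  induction n with
  | zero => intro ia ib; simp [pvGen]
  | succ n ih =>
      intro ia ib
      simp [pvGen, pvTakeCyc_length, ih, Nat.succ_mul]
      omega

theorem pvALoop_eq_gen (a b : List String) (tA tB : Nat) (hs : 0 < tA + tB) :
    ∀ (n : Nat) (ia ib : Nat) (p : Int) (result : List String),
    pvALoop a b (tA : Int) (tB : Int) ia ib p (p + ((n * (tA + tB) : Nat) : Int)) result
      = result ++ pvGen a b tA tB ia ib n := by
  intro n
  induction n with
  | zero =>
      intro ia ib p result
      rw [pvALoop]
      simp [pvGen]
  | succ n ih =>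
      intro ia ib p result
      rw [pvALoop]
      have hcond : p < p + ((((n+1) * (tA + tB) : Nat)) : Int) := by
        have : 0 < (n+1) * (tA + tB) := by positivity
        omega
      simp only [hcond, if_true, Int.toNat_natCast]
      rw [if_neg (by omega)]
      have harith : p + (tA : Int) + (tB : Int) + ((n * (tA + tB) : Nat) : Int)
          = p + (((n+1) * (tA + tB) : Nat) : Int) := by
        push_cast; ring
      rw [← harith, ih (ia + tA) (ib + tB) (p + (tA : Int) + (tB : Int))]
      rw [pvGen]
      simp [List.append_assoc]

theorem pvGen_getD (a b : List String) (tA tB : Nat) (hs : 0 < tA + tB) :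
    ∀ (n ia ib i : Nat), i < n * (tA + tB) →
    (pvGen a b tA tB ia ib n).getD i "" =
      if i % (tA + tB) < tA
      then a.getD ((ia + (i / (tA + tB)) * tA + i % (tA + tB)) % a.length) ""
      else b.getD ((ib + (i / (tA + tB)) * tB + (i % (tA + tB) - tA)) % b.length) "" := by
  intro n
  induction n with
  | zero => intro ia ib i hi; simp at hi
  | succ n ih =>
      intro ia ib i hi
      by_cases h1 : i < tA
      · rw [pvGen]
        rw [List.getD_append _ _ _ _ (by rw [pvTakeCyc_length]; exact h1)]
        rw [pvTakeCyc_getD _ _ _ _ h1]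
        have hm : i % (tA + tB) = i := Nat.mod_eq_of_lt (by omega)
        have hd : i / (tA + tB) = 0 := Nat.div_eq_of_lt (by omega)
        simp [hm, hd, h1]
      · by_cases h2 : i < tA + tB
        · rw [pvGen]
          rw [List.getD_append_right _ _ _ _ (by rw [pvTakeCyc_length]; omega)]
          rw [pvTakeCyc_length]
          rw [List.getD_append _ _ _ _ (by rw [pvTakeCyc_length]; omega)]
          rw [pvTakeCyc_getD _ _ _ _ (by omega)]
          have hm : i % (tA + tB) = i := Nat.mod_eq_of_lt h2
          have hd : i / (tA + tB) = 0 := Nat.div_eq_of_lt h2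
          simp [hm, hd, h1]
        · obtain ⟨j, rfl⟩ : ∃ j, i = j + (tA + tB) := ⟨i - (tA + tB), by omega⟩
          rw [pvGen]
          rw [List.getD_append_right _ _ _ _ (by rw [pvTakeCyc_length]; omega)]
          rw [pvTakeCyc_length]
          rw [List.getD_append_right _ _ _ _ (by rw [pvTakeCyc_length]; omega)]
          rw [pvTakeCyc_length]
          have hj : j + (tA + tB) - tA - tB = j := by omega
          rw [hj]
          have hjlt : j < n * (tA + tB) := by
            have := hi
            rw [Nat.succ_mul] at this
            omega
          rw [ih (ia + tA) (ib + tB) j hjlt]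
          have hm : (j + (tA + tB)) % (tA + tB) = j % (tA + tB) := Nat.add_mod_right _ _
          have hd : (j + (tA + tB)) / (tA + tB) = j / (tA + tB) + 1 :=
            Nat.add_div_right _ hs
          have ea : ia + (j / (tA + tB) + 1) * tA + j % (tA + tB)
              = ia + tA + j / (tA + tB) * tA + j % (tA + tB) := by ring
          have eb : ib + (j / (tA + tB) + 1) * tB + (j % (tA + tB) - tA)
              = ib + tB + j / (tA + tB) * tB + (j % (tA + tB) - tA) := by
            rw [Nat.add_mul, Nat.one_mul]; omega
          rw [hm, hd, ea, eb]

-- main case: both lists nonempty, 0 ≤ tA, 0 ≤ tB, 0 < tA + tB (stated over Nat takes)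
theorem pv_main (a b : List String) (tA tB : Nat) (ha : a ≠ []) (hb : b ≠ [])
    (hs : 0 < tA + tB) :
    interleave_lists_py a b (tA : Int) (tB : Int)
      = interleave_lists_py_alt a b (tA : Int) (tB : Int) := by
  have hne : ¬ (a = [] ∧ b = []) := by tauto
  unfold interleave_lists_py interleave_lists_py_alt
  rw [if_neg hne, if_neg ha, if_neg hb, if_neg hne, if_neg ha, if_neg hb]
  show PySem.List.slice
      (pvALoop a b (tA : Int) (tB : Int) 0 0 0
        (((max a.length b.length : Nat) : Int) * ((tA : Int) + (tB : Int))) []) none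
      (some (PySem.Int.floordiv (((max a.length b.length : Nat) : Int) * ((tA : Int) + (tB : Int)))
        (max (tA : Int) (tB : Int))))
    = (List.range (PySem.Int.floordiv (((max a.length b.length : Nat) : Int) * ((tA : Int) + (tB : Int)))
        (max (tA : Int) (tB : Int))).toNat).map (fun (i : Nat) =>
        if PySem.Int.mod (i : Int) ((tA : Int) + (tB : Int)) < (tA : Int) then
          a.getD (PySem.Int.mod (PySem.Int.floordiv (i : Int) ((tA : Int) + (tB : Int)) * (tA : Int)
            + PySem.Int.mod (i : Int) ((tA : Int) + (tB : Int))) (a.length : Int)).toNat ""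
        else
          b.getD (PySem.Int.mod (PySem.Int.floordiv (i : Int) ((tA : Int) + (tB : Int)) * (tB : Int)
            + (PySem.Int.mod (i : Int) ((tA : Int) + (tB : Int)) - (tA : Int))) (b.length : Int)).toNat "")
  set L : Nat := max a.length b.length with hL
  have hcast : ((L : Int)) * ((tA : Int) + (tB : Int)) = ((L * (tA + tB) : Nat) : Int) := by
    push_cast; ring
  have hmax : max (tA : Int) (tB : Int) = ((max tA tB : Nat) : Int) := by
    exact_mod_cast (Nat.cast_max (α := Int) ..).symm
  have hE : PySem.Int.floordiv ((L : Int) * ((tA : Int) + (tB : Int))) (max (tA : Int) (tB : Int))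
      = ((L * (tA + tB) / max tA tB : Nat) : Int) := by
    rw [hcast, hmax]; exact PySem.Int.floordiv_natCast _ _
  have hFle : L * (tA + tB) / max tA tB ≤ L * (tA + tB) := Nat.div_le_self _ _
  have hloop : pvALoop a b (tA : Int) (tB : Int) 0 0 0 ((L : Int) * ((tA : Int) + (tB : Int))) []
      = pvGen a b tA tB 0 0 L := by
    rw [hcast]
    simpa using pvALoop_eq_gen a b tA tB hs L 0 0 0 []
  rw [hloop, hE, PySem.List.slice_to_natCast, Int.toNat_natCast]
  set F : Nat := L * (tA + tB) / max tA tB with hF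
  apply List.ext_getElem
  · rw [List.length_take, List.length_map, List.length_range, pvGen_length]; omega
  · intro i hi1 hi2
    have hiF : i < F := by simpa using hi2
    have hiL : i < L * (tA + tB) := lt_of_lt_of_le hiF hFle
    have hglen : i < (pvGen a b tA tB 0 0 L).length := by
      rw [pvGen_length]; exact hiL
    simp only [List.getElem_take, List.getElem_map, List.getElem_range]
    rw [← List.getD_eq_getElem _ "" hglen]
    rw [pvGen_getD a b tA tB hs L 0 0 i hiL]
    have hper : (tA : Int) + (tB : Int) = (((tA + tB : Nat)) : Int) := by push_cast; ring
    have hrnd : PySem.Int.floordiv (i : Int) (((tA + tB : Nat)) : Int)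
        = ((i / (tA + tB) : Nat) : Int) := PySem.Int.floordiv_natCast _ _
    have hr : PySem.Int.mod (i : Int) (((tA + tB : Nat)) : Int)
        = ((i % (tA + tB) : Nat) : Int) := PySem.Int.mod_natCast _ _
    simp only [hper, hrnd, hr]
    by_cases hcase : i % (tA + tB) < tA
    · have hclt : ((i % (tA + tB) : Nat) : Int) < (tA : Int) := by exact_mod_cast hcase
      simp only [hcase, if_true, hclt, if_true]
      have e1 : ((i / (tA + tB) : Nat) : Int) * (tA : Int) + ((i % (tA + tB) : Nat) : Int)
          = (((i / (tA + tB)) * tA + i % (tA + tB) : Nat) : Int) := by push_cast; ring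
      rw [e1, PySem.Int.mod_natCast, Int.toNat_natCast]
      simp
    · have hclt : ¬ (((i % (tA + tB) : Nat) : Int) < (tA : Int)) := by
        exact_mod_cast hcase
      simp only [hcase, if_false, hclt, if_false]
      have hge : tA ≤ i % (tA + tB) := by omega
      have e1 : ((i / (tA + tB) : Nat) : Int) * (tB : Int)
            + (((i % (tA + tB) : Nat) : Int) - (tA : Int))
          = (((i / (tA + tB)) * tB + (i % (tA + tB) - tA) : Nat) : Int) := by
        push_cast [hge]; ring
      rw [e1, PySem.Int.mod_natCast, Int.toNat_natCast]
      simp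

-- the widened region: nonpositive sum, positive max — both sides return []
theorem pv_nil (a b : List String) (ta tb : Int) (ha : a ≠ []) (hb : b ≠ [])
    (hsum : ta + tb ≤ 0) (hmax : 0 < max ta tb) :
    interleave_lists_py a b ta tb = interleave_lists_py_alt a b ta tb := by
  have hne : ¬ (a = [] ∧ b = []) := by tauto
  unfold interleave_lists_py interleave_lists_py_alt
  rw [if_neg hne, if_neg ha, if_neg hb, if_neg hne, if_neg ha, if_neg hb]
  show PySem.List.slice
      (pvALoop a b ta tb 0 0 0 (((max a.length b.length : Nat) : Int) * (ta + tb)) []) none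
      (some (PySem.Int.floordiv (((max a.length b.length : Nat) : Int) * (ta + tb)) (max ta tb)))
    = (List.range (PySem.Int.floordiv (((max a.length b.length : Nat) : Int) * (ta + tb))
        (max ta tb)).toNat).map _
  have hnum : ((max a.length b.length : Nat) : Int) * (ta + tb) ≤ 0 :=
    mul_nonpos_of_nonneg_of_nonpos (by positivity) hsum
  have hA : pvALoop a b ta tb 0 0 0 (((max a.length b.length : Nat) : Int) * (ta + tb)) [] = [] := by
    rw [pvALoop]
    rw [if_neg (by omega)]
  have hB : (PySem.Int.floordiv (((max a.length b.length : Nat) : Int) * (ta + tb)) (max ta tb)).toNat = 0 := by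
    rw [PySem.Int.floordiv_eq_ediv_of_pos hmax]
    have : ((max a.length b.length : Nat) : Int) * (ta + tb) / max ta tb ≤ 0 / max ta tb :=
      Int.ediv_le_ediv hmax hnum
    rw [Int.zero_ediv] at this
    omega
  rw [hA, hB]
  simp [PySem.List.slice]

-- ===== VERDICT (by name: the statement is the Claim_ definition above) =====
theorem interleave_lists_py_spec : Claim_equal_interleave_lists_py := by
  intro la lb ta tb _hDom hPre
  unfold Spec_interleave_lists_py
  by_cases hab : la = [] ∧ lb = []
  · obtain ⟨h1, h2⟩ := hab
    subst h1; subst h2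
    rfl
  · by_cases ha : la = []
    · subst ha
      unfold interleave_lists_py interleave_lists_py_alt
      simp
    · by_cases hb : lb = []
      · subst hb
        unfold interleave_lists_py interleave_lists_py_alt
        simp [ha]
      · rcases hPre with h | ⟨hta, htb, hsum⟩ | ⟨hsum, hmax⟩
        · tauto
        · obtain ⟨tA, rfl⟩ := Int.eq_ofNat_of_zero_le hta
          obtain ⟨tB, rfl⟩ := Int.eq_ofNat_of_zero_le htb
          have hs : 0 < tA + tB := by exact_mod_cast hsum
          exact (pv_main la lb tA tB ha hb hs) ▸ rfl
        · exact (pv_nil la lb ta tb ha hb hsum hmax) ▸ rfl
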